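-- pv_equiv track=rewrite | github.com/lilingxi01/temporal-wiki-project | python/ergodiff/postprocess.py | build_waypoints
-- ===== SOURCE A (Python) =====
-- def build_waypoints(sentence: str, forward=False):
--     waypoints = []
--     if forward:
--         total_len = len(sentence)
--         curr_waypoint = total_len
--         for index, character in enumerate(reversed(sentence)):
--             index = total_len - 1 - index
--             if character == ' ':
--                 curr_waypoint = index
--                 waypoints.append(-1)
--             else:
--                 waypoints.append(curr_waypoint)
--         return waypoints[::-1]
--     else:
--         curr_waypoint = 0
--         for index, character in enumerate(sentence):
--             index = index
--             if character == ' ':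
--                 curr_waypoint = index + 1
--                 waypoints.append(-1)
--             else:
--                 waypoints.append(curr_waypoint)
--         return waypoints
-- ===== SOURCE B (Python) =====
-- def build_waypoints(sentence: str, forward=False):
--     n = len(sentence)
--     result = [-1] * n
--     i = 0
--     while i < n:
--         if sentence[i] == ' ':
--             i += 1
--             continue
--         j = i
--         while j < n and sentence[j] != ' ':
--             j += 1
--         b = j if forward else i
--         for k in range(i, j):
--             result[k] = b
--         i = j
--     return result
-- ===== Notes on version B (the rewrite author's own statement) =====
-- stated objective: alternative
-- what changed: B prefills [-1]*n and does one left-to-right two-pointer scan filling each maximal non-space run with its single boundary value, instead of A's per-character last-space bookkeeping with a reversed iteration plus a final [::-1] in forward mode.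
import Mathlib
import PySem

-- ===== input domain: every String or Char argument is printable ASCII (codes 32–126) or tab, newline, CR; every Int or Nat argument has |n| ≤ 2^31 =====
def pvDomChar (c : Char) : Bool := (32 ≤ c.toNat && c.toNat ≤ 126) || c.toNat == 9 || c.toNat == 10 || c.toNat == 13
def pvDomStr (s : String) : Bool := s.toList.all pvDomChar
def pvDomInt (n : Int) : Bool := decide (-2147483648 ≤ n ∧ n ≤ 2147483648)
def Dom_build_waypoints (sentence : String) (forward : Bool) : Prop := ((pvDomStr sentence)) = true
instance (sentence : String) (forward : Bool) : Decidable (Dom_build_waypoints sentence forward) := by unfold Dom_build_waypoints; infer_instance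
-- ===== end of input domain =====

-- B replaces A's last-space bookkeeping (and, in forward mode, reversed iteration plus a final [::-1])
-- by a single left-to-right two-pointer scan that fills each maximal non-space run with its one boundary value.

-- ===== PORT A =====
-- step of A's forward loop: enumerate over reversed(sentence), index recomputed as total-1-k
def pvStepF (total : Int) (st : Int × List Int) (p : Int × Char) : Int × List Int :=
  let index := total - 1 - p.1
  if p.2 = ' ' then (index, st.2 ++ [(-1 : Int)]) else (st.1, st.2 ++ [st.1])

-- step of A's backward (default) loop
def pvStepB (st : Int × List Int) (p : Int × Char) : Int × List Int :=
  if p.2 = ' ' then (p.1 + 1, st.2 ++ [(-1 : Int)]) else (st.1, st.2 ++ [st.1])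

def build_waypoints (sentence : String) (forward : Bool) : List Int :=
  let cs := sentence.toList
  if forward then
    let total : Int := cs.length
    let st := (PySem.List.enumerate cs.reverse 0).foldl (pvStepF total) (total, [])
    -- waypoints[::-1]
    match PySem.List.slice? st.2 none none (-1) with
    | some r => r
    | none => []
  else
    let st := (PySem.List.enumerate cs 0).foldl pvStepB (0, [])
    st.2

-- ===== PORT B =====
-- the inner-scan test of B: "still inside a word" (sentence[j] != ' ')
def pvNS (c : Char) : Bool := c ≠ ' '

-- two-pointer scan: skip spaces (slot keeps -1), fill each maximal non-space run with one boundary value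
def pvAltGo (cs : List Char) (i : Int) (fwd : Bool) : List Int :=
  match cs with
  | [] => []
  | c :: rest =>
    if c = ' ' then (-1 : Int) :: pvAltGo rest (i + 1) fwd
    else
      let run := List.takeWhile pvNS (c :: rest)
      let rest' := List.dropWhile pvNS (c :: rest)
      let j : Int := i + run.length
      List.replicate run.length (if fwd then j else i) ++ pvAltGo rest' j fwd
  termination_by cs.length
  decreasing_by
    · simp
    · simp_all [List.dropWhile, pvNS]
      exact List.length_dropWhile_le _ _

def build_waypoints_alt (sentence : String) (forward : Bool) : List Int :=
  pvAltGo sentence.toList 0 forward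

-- ===== PRECONDITION & SPEC =====
def Spec_build_waypoints (sentence : String) (forward : Bool) (out : List Int) : Prop := out = build_waypoints_alt sentence forward
instance (sentence : String) (forward : Bool) (out : List Int) : Decidable (Spec_build_waypoints sentence forward out) := by unfold Spec_build_waypoints; infer_instance

-- ===== CLAIM (what is proved, stated in full; the proofs are below) =====
def Claim_equal_build_waypoints : Prop := ∀ (sentence : String) (forward : Bool), Dom_build_waypoints sentence forward → Spec_build_waypoints sentence forward (build_waypoints sentence forward)

-- ===== LEMMAS AND PROOFS =====

-- unfolding lemmas for pvAltGo
theorem pvAltGo_nil (i : Int) (f : Bool) : pvAltGo [] i f = [] := by rw [pvAltGo]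

theorem pvAltGo_cons_sp (t : List Char) (i : Int) (f : Bool) :
    pvAltGo (' ' :: t) i f = (-1 : Int) :: pvAltGo t (i + 1) f := by rw [pvAltGo]; simp

theorem pvAltGo_cons_ns (c : Char) (t : List Char) (i : Int) (f : Bool) (hc : c ≠ ' ') :
    pvAltGo (c :: t) i f
      = List.replicate (List.takeWhile pvNS (c :: t)).length
          (if f then i + ((List.takeWhile pvNS (c :: t)).length : Int) else i)
        ++ pvAltGo (List.dropWhile pvNS (c :: t)) (i + ((List.takeWhile pvNS (c :: t)).length : Int)) f := by
  rw [pvAltGo]; simp [hc]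

-- takeWhile/dropWhile of an all-non-space list followed by anything
theorem pvTWall (l ys : List Char) (h : ∀ c ∈ l, c ≠ ' ') :
    List.takeWhile pvNS (l ++ ys) = l ++ List.takeWhile pvNS ys := by
  induction l with
  | nil => simp
  | cons c t ih =>
    have hc : c ≠ ' ' := h c (by simp)
    simp [List.takeWhile, pvNS, hc, ih (fun d hd => h d (by simp [hd]))]

theorem pvDWall (l ys : List Char) (h : ∀ c ∈ l, c ≠ ' ') :
    List.dropWhile pvNS (l ++ ys) = List.dropWhile pvNS ys := by
  induction l with
  | nil => simp
  | cons c t ih =>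
    have hc : c ≠ ' ' := h c (by simp)
    simp [List.dropWhile, pvNS, hc, ih (fun d hd => h d (by simp [hd]))]

-- takeWhile/dropWhile ignore a suffix appended after a space already present in l
theorem pvTWapp (l ys : List Char) (h : (∃ c ∈ l, c = ' ')) :
    List.takeWhile pvNS (l ++ ys) = List.takeWhile pvNS l := by
  induction l with
  | nil => simp at h
  | cons c t ih =>
    by_cases hc : c = ' '
    · simp [List.takeWhile, pvNS, hc]
    · have ht : ∃ d ∈ t, d = ' ' := by
        rcases h with ⟨d, hd, hd'⟩
        rcases List.mem_cons.mp hd with h1 | h1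
        · exact absurd (h1 ▸ hd') hc
        · exact ⟨d, h1, hd'⟩
      simp [List.takeWhile, pvNS, hc, ih ht]

theorem pvDWapp (l ys : List Char) (h : (∃ c ∈ l, c = ' ')) :
    List.dropWhile pvNS (l ++ ys) = List.dropWhile pvNS l ++ ys := by
  induction l with
  | nil => simp at h
  | cons c t ih =>
    by_cases hc : c = ' '
    · simp [List.dropWhile, pvNS, hc]
    · have ht : ∃ d ∈ t, d = ' ' := by
        rcases h with ⟨d, hd, hd'⟩
        rcases List.mem_cons.mp hd with h1 | h1
        · exact absurd (h1 ▸ hd') hc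
        · exact ⟨d, h1, hd'⟩
      simp [List.dropWhile, pvNS, hc, ih ht]

theorem pvDropHead (l : List Char) :
    List.dropWhile pvNS l = [] ∨ (List.dropWhile pvNS l).head? = some ' ' := by
  induction l with
  | nil => exact Or.inl rfl
  | cons c t ih =>
    by_cases hc : c = ' '
    · right; simp [List.dropWhile, pvNS, hc]
    · simpa [List.dropWhile, pvNS, hc] using ih

theorem pvDropLast (l : List Char) (h : l.getLast? = some ' ') :
    (List.dropWhile pvNS l).getLast? = some ' ' := by
  induction l with
  | nil => simp at h
  | cons c t ih =>
    cases t with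
    | nil =>
      simp at h
      simp [List.dropWhile, pvNS, h]
    | cons d u =>
      rw [List.getLast?_cons_cons] at h
      by_cases hc : c = ' '
      · simpa [List.dropWhile, pvNS, hc, List.getLast?_cons_cons] using h
      · simpa [List.dropWhile, pvNS, hc] using ih h

-- recursion form of A's backward loop: state (curr, index)
def pvAGoB : List Char → Int → Int → List Int
  | [], _, _ => []
  | c :: rest, curr, i =>
    if c = ' ' then (-1 : Int) :: pvAGoB rest (i + 1) (i + 1)
    else curr :: pvAGoB rest curr (i + 1)

-- recursion form of A's forward loop over the reversed list: state (curr, index counting down)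
def pvAGoF : List Char → Int → Int → List Int
  | [], _, _ => []
  | c :: rest, curr, i =>
    if c = ' ' then (-1 : Int) :: pvAGoF rest i (i - 1)
    else curr :: pvAGoF rest curr (i - 1)

theorem pvFoldB (l : List Char) (k curr : Int) (acc : List Int) :
    ((PySem.List.enumerate l k).foldl pvStepB (curr, acc)).2 = acc ++ pvAGoB l curr k := by
  induction l generalizing k curr acc with
  | nil => simp [PySem.List.enumerate_nil, pvAGoB]
  | cons c rest ih =>
    rw [PySem.List.enumerate_cons]
    by_cases hc : c = ' ' <;> simp [pvStepB, hc, ih, pvAGoB]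

theorem pvFoldF (total : Int) (l : List Char) (k curr : Int) (acc : List Int) :
    ((PySem.List.enumerate l k).foldl (pvStepF total) (curr, acc)).2
      = acc ++ pvAGoF l curr (total - 1 - k) := by
  induction l generalizing k curr acc with
  | nil => simp [PySem.List.enumerate_nil, pvAGoF]
  | cons c rest ih =>
    rw [PySem.List.enumerate_cons]
    have harith : total - 1 - (k + 1) = total - 1 - k - 1 := by ring
    by_cases hc : c = ' ' <;> simp [pvStepF, hc, ih, pvAGoF, harith]

theorem pvRunB (run rest : List Char) (b i : Int) (hr : ∀ c ∈ run, c ≠ ' ') :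
    pvAGoB (run ++ rest) b i = List.replicate run.length b ++ pvAGoB rest b (i + run.length) := by
  induction run generalizing i with
  | nil => simp
  | cons r rs ih =>
    have hr0 : r ≠ ' ' := hr r (by simp)
    have : i + 1 + (rs.length : Int) = i + ((rs.length : Int) + 1) := by ring
    simp [pvAGoB, hr0, ih _ (fun c hc => hr c (by simp [hc])), List.replicate_succ, this]

theorem pvRunF (run rest : List Char) (curr i : Int) (hr : ∀ c ∈ run, c ≠ ' ') :
    pvAGoF (run ++ rest) curr i = List.replicate run.length curr ++ pvAGoF rest curr (i - run.length) := by
  induction run generalizing i with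
  | nil => simp
  | cons r rs ih =>
    have hr0 : r ≠ ' ' := hr r (by simp)
    have : i - 1 - (rs.length : Int) = i - ((rs.length : Int) + 1) := by ring
    simp [pvAGoF, hr0, ih _ (fun c hc => hr c (by simp [hc])), List.replicate_succ, this]

theorem pvBackMain (n : Nat) (cs : List Char) (i b : Int)
    (hn : cs.length ≤ n) (h : cs = [] ∨ cs.head? = some ' ' ∨ b = i) :
    pvAGoB cs b i = pvAltGo cs i false := by
  induction n generalizing cs i b with
  | zero =>
    have : cs = [] := by simpa using List.length_eq_zero_iff.mp (Nat.le_zero.mp hn)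
    simp [this, pvAGoB, pvAltGo_nil]
  | succ n ih =>
    cases cs with
    | nil => simp [pvAGoB, pvAltGo_nil]
    | cons c rest =>
      by_cases hc : c = ' '
      · subst hc
        rw [pvAltGo_cons_sp]
        simp only [pvAGoB, if_pos rfl]
        exact congrArg _ (ih rest (i + 1) (i + 1) (by simp at hn; omega) (Or.inr (Or.inr rfl)))
      · have hb : b = i := by
          rcases h with h | h | h
          · simp at h
          · simp [hc] at h
          · exact h
        subst hb
        have hdecomp := List.takeWhile_append_dropWhile (p := pvNS) (l := c :: rest)
        have hmem : ∀ x ∈ List.takeWhile pvNS (c :: rest), x ≠ ' ' := by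
          intro x hx
          have := List.mem_takeWhile_imp hx
          simpa [pvNS] using this
        have hlen : (List.dropWhile pvNS (c :: rest)).length ≤ rest.length := by
          simp [List.dropWhile, pvNS, hc]
          exact List.length_dropWhile_le _ _
        conv_lhs => rw [← hdecomp]
        rw [pvRunB _ _ _ _ hmem]
        rw [pvAltGo_cons_ns _ _ _ _ hc]
        simp only [if_neg (by simp : ¬ (false = true))]
        refine congrArg _ ?_
        exact ih _ _ _ (by simp at hn; omega)
          (by rcases pvDropHead (c :: rest) with h1 | h1
              · exact Or.inl h1
              · exact Or.inr (Or.inl h1))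

theorem pvAppendSpace (n : Nat) (xs : List Char) (i : Int) (hn : xs.length ≤ n) :
    pvAltGo (xs ++ [' ']) i true = pvAltGo xs i true ++ [(-1 : Int)] := by
  induction n generalizing xs i with
  | zero =>
    have : xs = [] := by simpa using List.length_eq_zero_iff.mp (Nat.le_zero.mp hn)
    simp [this, pvAltGo_nil, pvAltGo_cons_sp]
  | succ n ih =>
    cases xs with
    | nil => simp [pvAltGo_nil, pvAltGo_cons_sp]
    | cons c t =>
      by_cases hc : c = ' '
      · subst hc
        rw [List.cons_append, pvAltGo_cons_sp, pvAltGo_cons_sp]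
        exact congrArg _ (ih t (i + 1) (by simp at hn; omega))
      · -- the trailing space cannot merge with any run of xs
        have hTW : List.takeWhile pvNS ((c :: t) ++ [' ']) = List.takeWhile pvNS (c :: t) := by
          by_cases hsp : ∃ d ∈ c :: t, d = ' '
          · exact pvTWapp _ _ hsp
          · push_neg at hsp
            have hall : List.takeWhile pvNS (c :: t) = c :: t := by
              have h0 := pvTWall (c :: t) [] hsp
              rwa [List.append_nil, List.takeWhile_nil, List.append_nil] at h0
            rw [pvTWall _ _ hsp, hall]
            simp [List.takeWhile, pvNS]
        have hDW : List.dropWhile pvNS ((c :: t) ++ [' ']) = List.dropWhile pvNS (c :: t) ++ [' '] := by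
          by_cases hsp : ∃ d ∈ c :: t, d = ' '
          · exact pvDWapp _ _ hsp
          · push_neg at hsp
            have hnone : List.dropWhile pvNS (c :: t) = [] := by
              have h0 := pvDWall (c :: t) [] hsp
              rwa [List.append_nil, List.dropWhile_nil] at h0
            rw [pvDWall _ _ hsp, hnone]
            simp [List.dropWhile, pvNS]
        rw [List.cons_append, pvAltGo_cons_ns _ _ _ _ hc, pvAltGo_cons_ns _ _ _ _ hc]
        rw [← List.cons_append, hTW, hDW]
        have hlen : (List.dropWhile pvNS (c :: t)).length ≤ t.length := by
          simp [List.dropWhile, pvNS, hc]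
          exact List.length_dropWhile_le _ _
        rw [List.append_assoc]
        exact congrArg _ (ih _ _ (by simp at hn; omega))

theorem pvAppendRun (n : Nat) (xs run : List Char) (i : Int) (hn : xs.length ≤ n)
    (hr : run ≠ []) (hrs : ∀ c ∈ run, c ≠ ' ') (hx : xs = [] ∨ xs.getLast? = some ' ') :
    pvAltGo (xs ++ run) i true
      = pvAltGo xs i true ++ List.replicate run.length ((i + xs.length) + run.length) := by
  induction n generalizing xs i with
  | zero =>
    have hxs : xs = [] := by simpa using List.length_eq_zero_iff.mp (Nat.le_zero.mp hn)
    subst hxs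
    cases run with
    | nil => exact absurd rfl hr
    | cons r rs =>
      have hr0 : r ≠ ' ' := hrs r (by simp)
      rw [List.nil_append, pvAltGo_cons_ns _ _ _ _ hr0]
      have hall : List.takeWhile pvNS (r :: rs) = r :: rs := by
        have := pvTWall (r :: rs) [] hrs; simpa using this
      have hnone : List.dropWhile pvNS (r :: rs) = [] := by
        have := pvDWall (r :: rs) [] hrs; simpa using this
      simp [hall, hnone, pvAltGo_nil]
  | succ n ih =>
    cases xs with
    | nil =>
      cases run with
      | nil => exact absurd rfl hr
      | cons r rs =>
        have hr0 : r ≠ ' ' := hrs r (by simp)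
        rw [List.nil_append, pvAltGo_cons_ns _ _ _ _ hr0]
        have hall : List.takeWhile pvNS (r :: rs) = r :: rs := by
          have := pvTWall (r :: rs) [] hrs; simpa using this
        have hnone : List.dropWhile pvNS (r :: rs) = [] := by
          have := pvDWall (r :: rs) [] hrs; simpa using this
        simp [hall, hnone, pvAltGo_nil]
    | cons c t =>
      have hlast : (c :: t).getLast? = some ' ' := by
        rcases hx with hx | hx
        · simp at hx
        · exact hx
      by_cases hc : c = ' '
      · subst hc
        rw [List.cons_append, pvAltGo_cons_sp, pvAltGo_cons_sp]
        have ht : t = [] ∨ t.getLast? = some ' ' := by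
          cases t with
          | nil => exact Or.inl rfl
          | cons d u => exact Or.inr (by rw [List.getLast?_cons_cons] at hlast; exact hlast)
        rw [ih t (i + 1) (by simp at hn; omega) ht]
        have : i + 1 + (t.length : Int) + (run.length : Int)
            = i + (((t.length : Nat) + 1 : Nat) : Int) + (run.length : Int) := by push_cast; ring
        simp [this]
      · have hsp : ∃ d ∈ c :: t, d = ' ' := ⟨' ', List.mem_of_getLast? hlast, rfl⟩
        have hTW2 : List.takeWhile pvNS (c :: (t ++ run)) = List.takeWhile pvNS (c :: t) := by
          rw [← List.cons_append]; exact pvTWapp _ _ hsp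
        have hDW2 : List.dropWhile pvNS (c :: (t ++ run)) = List.dropWhile pvNS (c :: t) ++ run := by
          rw [← List.cons_append]; exact pvDWapp _ _ hsp
        rw [List.cons_append, pvAltGo_cons_ns _ _ _ _ hc, hTW2, hDW2, pvAltGo_cons_ns c t _ _ hc]
        set r1 := List.takeWhile pvNS (c :: t) with hr1
        set rest1 := List.dropWhile pvNS (c :: t) with hrest1
        have hdecomp : r1 ++ rest1 = c :: t := List.takeWhile_append_dropWhile
        have hlen1 : r1.length + rest1.length = t.length + 1 := by
          have := congrArg List.length hdecomp
          simpa using this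
        have hlen : rest1.length ≤ t.length := by
          rw [hrest1]
          simp [List.dropWhile, pvNS, hc]
          exact List.length_dropWhile_le _ _
        have hrest1last : rest1 = [] ∨ rest1.getLast? = some ' ' :=
          Or.inr (pvDropLast _ hlast)
        rw [ih rest1 (i + r1.length) (by simp at hn; omega) hrest1last]
        have harith : i + (r1.length : Int) + (rest1.length : Int) + (run.length : Int)
            = i + (((c :: t).length : Nat) : Int) + (run.length : Int) := by
          simp only [List.length_cons]
          push_cast
          have : (r1.length : Int) + (rest1.length : Int) = (t.length : Int) + 1 := by
            exact_mod_cast congrArg (Nat.cast (R := Int)) hlen1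
          omega
        rw [List.append_assoc, harith]

theorem pvFwdMain (n : Nat) (rcs : List Char) (i curr : Int)
    (hn : rcs.length ≤ n) (h : rcs = [] ∨ rcs.head? = some ' ' ∨ curr = i + 1) :
    (pvAGoF rcs curr i).reverse = pvAltGo rcs.reverse (i + 1 - rcs.length) true := by
  induction n generalizing rcs i curr with
  | zero =>
    have : rcs = [] := by simpa using List.length_eq_zero_iff.mp (Nat.le_zero.mp hn)
    simp [this, pvAGoF, pvAltGo_nil]
  | succ n ih =>
    cases rcs with
    | nil => simp [pvAGoF, pvAltGo_nil]
    | cons c rest =>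
      by_cases hc : c = ' '
      · subst hc
        rw [pvAGoF, if_pos rfl, List.reverse_cons, List.reverse_cons]
        rw [ih rest (i - 1) i (by simp at hn; omega) (Or.inr (Or.inr (by ring)))]
        have harith : i - 1 + 1 - (rest.length : Int) = i + 1 - (((rest.length : Nat) + 1 : Nat) : Int) := by
          push_cast; ring
        rw [harith]
        simp only [List.length_cons]
        exact (pvAppendSpace rest.reverse.length rest.reverse _ (le_refl _)).symm
      · have hcurr : curr = i + 1 := by
          rcases h with h | h | h
          · simp at h
          · simp [hc] at h
          · exact h
        subst hcurr
        have hdecomp := List.takeWhile_append_dropWhile (p := pvNS) (l := c :: rest)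
        set run := List.takeWhile pvNS (c :: rest) with hrun
        set rest' := List.dropWhile pvNS (c :: rest) with hrest'
        have hmem : ∀ x ∈ run, x ≠ ' ' := by
          intro x hx
          have := List.mem_takeWhile_imp hx
          simpa [pvNS] using this
        have hrunne : run ≠ [] := by
          rw [hrun]
          simp [List.takeWhile, pvNS, hc]
        have hlenrest : rest'.length ≤ rest.length := by
          rw [hrest']
          simp [List.dropWhile, pvNS, hc]
          exact List.length_dropWhile_le _ _
        have hlensum : run.length + rest'.length = rest.length + 1 := by
          have := congrArg List.length hdecomp
          simpa using this
        conv_lhs => rw [← hdecomp]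
        rw [pvRunF _ _ _ _ hmem]
        rw [List.reverse_append, List.reverse_replicate]
        rw [ih rest' (i - run.length) (i + 1) (by simp at hn; omega)
          (by rcases pvDropHead (c :: rest) with h1 | h1
              · exact Or.inl (hrest' ▸ h1)
              · exact Or.inr (Or.inl (hrest' ▸ h1)))]
        have hrev : (c :: rest).reverse = rest'.reverse ++ run.reverse := by
          rw [← hdecomp, List.reverse_append]
        rw [hrev]
        have hxlast : rest'.reverse = [] ∨ rest'.reverse.getLast? = some ' ' := by
          rcases pvDropHead (c :: rest) with h1 | h1
          · exact Or.inl (by simp [hrest' ▸ h1])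
          · right
            rw [List.getLast?_reverse]
            exact hrest' ▸ h1
        have hmemrev : ∀ x ∈ run.reverse, x ≠ ' ' := by
          intro x hx; exact hmem x (List.mem_reverse.mp hx)
        have hrunnerev : run.reverse ≠ [] := by simpa using hrunne
        rw [pvAppendRun rest'.reverse.length rest'.reverse run.reverse _ (le_refl _) hrunnerev hmemrev hxlast]
        have e1 : i - (run.length : Int) + 1 - (rest'.length : Int)
            = i + 1 - (((c :: rest).length : Nat) : Int) := by
          simp only [List.length_cons]
          push_cast
          omega
        have e2 : i + 1 - (((c :: rest).length : Nat) : Int) + ((rest'.reverse.length : Nat) : Int) + ((run.reverse.length : Nat) : Int) = i + 1 := by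
          simp only [List.length_reverse, List.length_cons]
          push_cast
          omega
        rw [e1, e2]
        simp

-- ===== VERDICT (by name: the statement is the Claim_ definition above) =====
theorem build_waypoints_spec : Claim_equal_build_waypoints := by
  intro sentence forward _
  unfold Spec_build_waypoints build_waypoints build_waypoints_alt
  cases forward with
  | false =>
    simp only [if_neg (by simp : ¬ (false = true))]
    rw [pvFoldB]
    simp only [List.nil_append]
    exact pvBackMain sentence.toList.length _ _ _ (le_refl _) (Or.inr (Or.inr rfl))
  | true =>
    simp only [if_pos rfl]
    rw [pvFoldF]
    simp only [List.nil_append, PySem.List.slice?_none_none_neg_one]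
    have h := pvFwdMain sentence.toList.reverse.length sentence.toList.reverse
      ((sentence.toList.length : Int) - 1) (sentence.toList.length : Int)
      (le_refl _) (Or.inr (Or.inr (by ring)))
    have e : (sentence.toList.length : Int) - 1 - 0 = (sentence.toList.length : Int) - 1 := by ring
    rw [e, h]
    simp
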